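-- pv_equiv track=rewrite | github.com/aheed/advent-of-code-2023 | src/adv14_1.py | tilt_column
-- ===== SOURCE A (Python) =====
-- def tilt_column(column: str) -> str:
--     no_destination = -1
--     destination_pos = no_destination
--     chars = list(column)
--     main_pos = 0
--     while main_pos < len(chars):
--         c = chars[main_pos]
--         if c == ".":
--             if destination_pos == no_destination:
--                 destination_pos = main_pos
--         if c == "#":
--             destination_pos = no_destination
--         if c == "O":
--             if destination_pos != no_destination:
--                 chars[destination_pos] = "O"
--                 chars[main_pos] = "."
--                 main_pos = destination_pos
--                 destination_pos = no_destination
--         main_pos = main_pos + 1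
--     return "".join(chars)
-- ===== SOURCE B (Python) =====
-- def tilt_column(column: str) -> str:
--     chars = list(column)
--     free = []   # indices of unfilled '.' slots in the current '#'-free segment, increasing
--     head = 0    # queue head: free[head:] are the still-available slots
--     for i, c in enumerate(chars):
--         if c == "#":
--             free = []
--             head = 0
--         elif c == ".":
--             free.append(i)
--         elif c == "O" and head < len(free):
--             j = free[head]
--             head += 1
--             chars[j] = "O"
--             chars[i] = "."
--             free.append(i)
--     return "".join(chars)
-- ===== Notes on version B (the rewrite author's own statement) =====
-- stated objective: faster
-- what changed: replaces A's swap-then-jump-back rescanning while loop with a single forward pass that keeps a FIFO queue (list plus head index) of free '.' slots, cleared at '#', so no position is ever revisited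
import Mathlib
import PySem

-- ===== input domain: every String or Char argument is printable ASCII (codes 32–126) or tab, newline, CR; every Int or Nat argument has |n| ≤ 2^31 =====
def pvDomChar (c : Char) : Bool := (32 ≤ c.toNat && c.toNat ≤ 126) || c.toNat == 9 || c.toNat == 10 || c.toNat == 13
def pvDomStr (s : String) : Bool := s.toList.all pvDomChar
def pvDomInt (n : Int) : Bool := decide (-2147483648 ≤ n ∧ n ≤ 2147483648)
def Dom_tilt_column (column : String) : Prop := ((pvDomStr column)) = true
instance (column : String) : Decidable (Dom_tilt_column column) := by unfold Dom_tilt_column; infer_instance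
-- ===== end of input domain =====

-- B replaces A's swap-then-jump-back rescanning loop with one forward pass over a FIFO
-- queue of free '.' slots (objective: faster; the proof is pure return-value equivalence).

-- ===== PORT A =====
-- A's while loop, which can jump main_pos backwards; ported with a fuel counter that
-- only makes the recursion total (fuel (n+1)^2 dominates A's step count, see the proof).
-- The -1 'no_destination' sentinel is encoded as `none`.
def tiltA_loop (fuel : Nat) (chars : List Char) (mainPos : Nat) (destPos : Option Nat) : List Char :=
  match fuel with
  | 0 => chars
  | fuel + 1 =>
    if mainPos < chars.length then
      let c := chars.getD mainPos ' '
      if c = '.' then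
        tiltA_loop fuel chars (mainPos + 1) (destPos.or (some mainPos))
      else if c = '#' then
        tiltA_loop fuel chars (mainPos + 1) none
      else if c = 'O' then
        match destPos with
        | none => tiltA_loop fuel chars (mainPos + 1) none
        | some d => tiltA_loop fuel ((chars.set d 'O').set mainPos '.') (d + 1) none
      else
        tiltA_loop fuel chars (mainPos + 1) destPos
    else chars

def tilt_column (column : String) : String :=
  let chars := column.toList
  String.mk (tiltA_loop ((chars.length + 1) * (chars.length + 1)) chars 0 none)

-- ===== PORT B =====
-- B's single forward pass: `free` with head index `head` is a FIFO queue of the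
-- unfilled '.' positions of the current '#'-free segment.
def tiltB_loop (chars : List Char) (mainPos : Nat) (free : List Nat) (head : Nat) : List Char :=
  if h : mainPos < chars.length then
    let c := chars.getD mainPos ' '
    if c = '#' then
      tiltB_loop chars (mainPos + 1) [] 0
    else if c = '.' then
      tiltB_loop chars (mainPos + 1) (free ++ [mainPos]) head
    else if c = 'O' ∧ head < free.length then
      let j := free.getD head 0
      tiltB_loop ((chars.set j 'O').set mainPos '.') (mainPos + 1) (free ++ [mainPos]) (head + 1)
    else
      tiltB_loop chars (mainPos + 1) free head
  else chars
termination_by chars.length - mainPos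
decreasing_by all_goals (first | omega | (simp [List.length_set]; omega))

def tilt_column_alt (column : String) : String :=
  String.mk (tiltB_loop column.toList 0 [] 0)

-- ===== PRECONDITION & SPEC =====
def Spec_tilt_column (column : String) (out : String) : Prop := out = tilt_column_alt column
instance (column : String) (out : String) : Decidable (Spec_tilt_column column out) := by unfold Spec_tilt_column; infer_instance

-- ===== CLAIM (what is proved, stated in full; the proofs are below) =====
def Claim_equal_tilt_column : Prop := ∀ (column : String), Dom_tilt_column column → Spec_tilt_column column (tilt_column column)

-- ===== LEMMAS AND PROOFS =====

-- B's loop with the queue materialised as the list `free.drop head`.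
def tiltB_core (chars : List Char) (mainPos : Nat) (q : List Nat) : List Char :=
  if h : mainPos < chars.length then
    let c := chars.getD mainPos ' '
    if c = '#' then
      tiltB_core chars (mainPos + 1) []
    else if c = '.' then
      tiltB_core chars (mainPos + 1) (q ++ [mainPos])
    else if c = 'O' then
      match q with
      | [] => tiltB_core chars (mainPos + 1) []
      | j :: rest => tiltB_core ((chars.set j 'O').set mainPos '.') (mainPos + 1) (rest ++ [mainPos])
    else
      tiltB_core chars (mainPos + 1) q
  else chars
termination_by chars.length - mainPos
decreasing_by all_goals (first | omega | (simp [List.length_set]; omega))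

theorem tiltB_loop_eq_core (chars : List Char) (mainPos : Nat) (free : List Nat) (head : Nat) :
    head ≤ free.length → tiltB_loop chars mainPos free head = tiltB_core chars mainPos (free.drop head) := by
  induction chars, mainPos, free, head using tiltB_loop.induct with
  | case1 chars mp free head h c hc ih =>
    intro hle
    have hc' : chars.getD mp ' ' = '#' := hc
    rw [tiltB_loop, tiltB_core.eq_def]
    simp only [dif_pos h, hc', reduceIte]
    simpa using ih (by simp)
  | case2 chars mp free head h c hc1 hc ih =>
    intro hle
    have hc' : chars.getD mp ' ' = '.' := hc
    rw [tiltB_loop, tiltB_core.eq_def]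
    rw [List.drop_append_of_le_length hle] at ih
    simp only [dif_pos h, hc', reduceIte]
    exact ih (by simp; omega)
  | case3 chars mp free head h c hc1 hc2 hc j ih =>
    intro hle
    have hlt : head < free.length := hc.2
    have hc' : chars.getD mp ' ' = 'O' := hc.1
    rw [tiltB_loop, tiltB_core.eq_def]
    rw [List.drop_append_of_le_length (by omega : head + 1 ≤ free.length)] at ih
    rw [List.drop_eq_getElem_cons hlt]
    have hj : j = free[head] := List.getD_eq_getElem free 0 hlt
    rw [hj] at ih
    simp only [dif_pos h, hc', reduceIte, hlt, and_true, List.getD_eq_getElem free 0 hlt]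
    have e1 : ¬(('O' : Char) = '#') := by decide
    have e2 : ¬(('O' : Char) = '.') := by decide
    rw [if_neg e1, if_neg e1, if_neg e2, if_neg e2]
    exact ih (by simp; omega)
  | case4 chars mp free head h c hc1 hc2 hc ih =>
    intro hle
    rw [tiltB_loop, tiltB_core.eq_def]
    simp only [dif_pos h]
    by_cases hO : chars.getD mp ' ' = 'O'
    · have hge : free.length ≤ head := by
        by_contra hx; exact hc ⟨hO, by omega⟩
      have hdrop : List.drop head free = [] := List.drop_eq_nil_of_le hge
      have hnlt : ¬(head < free.length) := by omega
      simp only [hO, reduceIte, hdrop, hnlt, and_false]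
      have e1 : ¬(('O' : Char) = '#') := by decide
      have e2 : ¬(('O' : Char) = '.') := by decide
      rw [if_neg e1, if_neg e1, if_neg e2, if_neg e2]
      simpa [hdrop] using ih hle
    · have hc1' : chars.getD mp ' ' ≠ '#' := hc1
      have hc2' : chars.getD mp ' ' ≠ '.' := hc2
      have hx : ¬(chars.getD mp ' ' = 'O' ∧ head < free.length) := by
        rintro ⟨hy, -⟩; exact hO hy
      rw [if_neg hc1', if_neg hc1', if_neg hc2', if_neg hc2', if_neg hx, if_neg hO]
      exact ih hle
  | case5 chars mp free head h =>
    intro _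
    rw [tiltB_loop, tiltB_core.eq_def]
    simp [h]
def firstDot (chars : List Char) (p k : Nat) : Option Nat :=
  match k with
  | 0 => none
  | k + 1 => if chars.getD p ' ' = '.' then some p else firstDot chars (p + 1) k

theorem scan_lemma : ∀ k fuel chars p (dest : Option Nat),
    (∀ i, p ≤ i → i < p + k → chars.getD i ' ' ≠ '#' ∧ chars.getD i ' ' ≠ 'O') →
    p + k ≤ chars.length → k ≤ fuel →
    tiltA_loop fuel chars p dest = tiltA_loop (fuel - k) chars (p + k) (dest.or (firstDot chars p k)) := by
  intro k
  induction k with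
  | zero =>
    intro fuel chars p dest _ _ _
    simp [firstDot]
  | succ k IH =>
    intro fuel chars p dest hno hlen hfuel
    obtain ⟨f, rfl⟩ : ∃ f, fuel = f + 1 := ⟨fuel - 1, by omega⟩
    have hp : p < chars.length := by omega
    have hnh : chars.getD p ' ' ≠ '#' := (hno p le_rfl (by omega)).1
    have hnO : chars.getD p ' ' ≠ 'O' := (hno p le_rfl (by omega)).2
    have harith : p + (k + 1) = (p + 1) + k := by omega
    have hfd : firstDot chars p (k + 1)
        = if chars.getD p ' ' = '.' then some p else firstDot chars (p + 1) k := rfl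
    rw [tiltA_loop.eq_def]
    simp only [if_pos hp]
    by_cases hdot : chars.getD p ' ' = '.'
    · rw [if_pos hdot]
      rw [IH f chars (p + 1) (dest.or (some p))
        (by intro i h1 h2; exact hno i (by omega) (by omega)) (by omega) (by omega)]
      rw [hfd, if_pos hdot, harith]
      simp [Nat.succ_sub_succ]
    · rw [if_neg hdot, if_neg hnh, if_neg hnO]
      rw [IH f chars (p + 1) dest
        (by intro i h1 h2; exact hno i (by omega) (by omega)) (by omega) (by omega)]
      rw [hfd, if_neg hdot, harith]
      simp [Nat.succ_sub_succ]
lemma getD_set_self (l : List Char) (mp : Nat) (c : Char) (h : mp < l.length) :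
    (l.set mp c).getD mp ' ' = c := by
  simp [List.getD_eq_getElem?_getD, h]

lemma getD_set_ne (l : List Char) (mp i : Nat) (c : Char) (h : i ≠ mp) :
    (l.set mp c).getD i ' ' = l.getD i ' ' := by
  simp [List.getD_eq_getElem?_getD, List.getElem?_set_ne (by omega : mp ≠ i)]

lemma firstDot_eq_some : ∀ k (chars : List Char) p i, p ≤ i → i < p + k →
    chars.getD i ' ' = '.' → (∀ i', p ≤ i' → i' < i → chars.getD i' ' ' ≠ '.') →
    firstDot chars p k = some i := by
  intro k
  induction k with
  | zero => intro chars p i h1 h2 _ _; omega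
  | succ k IH =>
    intro chars p i h1 h2 hdot hfst
    rw [firstDot]
    by_cases hp : chars.getD p ' ' = '.'
    · have : i = p := by
        by_contra hne
        exact hfst p le_rfl (by omega) hp
      rw [if_pos hp, this]
    · have hip : i ≠ p := fun he => hp (he ▸ hdot)
      rw [if_neg hp]
      exact IH chars (p + 1) i (by omega) (by omega) hdot (fun i' a b => hfst i' (by omega) b)

def INV (chars : List Char) (mainPos : Nat) (q : List Nat) : Prop :=
  ∃ s, s ≤ mainPos ∧
    (∀ i, s ≤ i → i < mainPos → chars.getD i ' ' ≠ '#') ∧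
    (∀ i, i ∈ q ↔ (s ≤ i ∧ i < mainPos ∧ chars.getD i ' ' = '.')) ∧
    q.Pairwise (· < ·) ∧
    (∀ p, s ≤ p → p < mainPos → chars.getD p ' ' = 'O' → ∀ d ∈ q, p < d)

theorem main_lemma : ∀ fuel chars mainPos q, INV chars mainPos q →
    (chars.length - mainPos) * (chars.length + 1) ≤ fuel →
    tiltA_loop fuel chars mainPos q.head? = tiltB_core chars mainPos q := by
  intro fuel
  induction fuel using Nat.strong_induction_on with
  | _ fuel IH =>
  intro chars mp q hinv hfuel
  by_cases hlt : mp < chars.length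
  case neg =>
    rw [tiltB_core.eq_def]
    rcases fuel with _ | f
    · simp [tiltA_loop, hlt]
    · rw [tiltA_loop.eq_def]; simp [hlt]
  case pos =>
    have hmul : (chars.length - mp) * (chars.length + 1)
        = (chars.length - (mp + 1)) * (chars.length + 1) + (chars.length + 1) := by
      have h1 : chars.length - mp = (chars.length - (mp + 1)) + 1 := by omega
      rw [h1, add_mul, one_mul]
    obtain ⟨f, rfl⟩ : ∃ f, fuel = f + 1 := ⟨fuel - 1, by omega⟩
    obtain ⟨s, hs_le, hsharp, hmem, hpw, hOc⟩ := hinv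
    rw [tiltA_loop.eq_def, tiltB_core.eq_def]
    simp only [if_pos hlt, dif_pos hlt]
    by_cases hdot : chars.getD mp ' ' = '.'
    · -- '.' : A records the slot if none yet, B appends it to the queue
      rw [if_pos hdot, if_pos hdot]
      have hnh : chars.getD mp ' ' ≠ '#' := by rw [hdot]; decide
      rw [if_neg hnh]
      have hq : (q ++ [mp]).head? = q.head?.or (some mp) := by cases q <;> simp
      rw [← hq]
      refine IH f (by omega) chars (mp + 1)  (q ++ [mp])
        ⟨s, by omega, ?_, ?_, ?_, ?_⟩ (by omega)
      · intro i h1 h2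
        rcases Nat.lt_or_ge i mp with h | h
        · exact hsharp i h1 h
        · have : i = mp := by omega
          rw [this, hdot]; decide
      · intro i
        simp only [List.mem_append, List.mem_singleton, hmem]
        constructor
        · rintro (⟨a, b, c⟩ | rfl)
          · exact ⟨a, by omega, c⟩
          · exact ⟨hs_le, by omega, hdot⟩
        · rintro ⟨a, b, c⟩
          rcases Nat.lt_or_ge i mp with h | h
          · exact Or.inl ⟨a, h, c⟩
          · exact Or.inr (by omega)
      · refine List.pairwise_append.2 ⟨hpw, by simp, ?_⟩
        intro a ha b hb
        simp at hb; subst hb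
        exact ((hmem a).1 ha).2.1
      · intro p h1 h2 hO d hd
        rcases List.mem_append.1 hd with hd | hd
        · have hpmp : p ≠ mp := fun he => by
            rw [he, hdot] at hO; exact absurd hO (by decide)
          exact hOc p h1 (by omega) hO d hd
        · simp at hd
          have : p ≠ mp := fun he => by
            rw [he, hdot] at hO; exact absurd hO (by decide)
          omega
    · rw [if_neg hdot, if_neg hdot]
      by_cases hhash : chars.getD mp ' ' = '#'
      · -- '#': both reset the segment
        rw [if_pos hhash, if_pos hhash]
        have : (([] : List Nat)).head? = none := rfl
        rw [← this]
        refine IH f (by omega) chars (mp + 1) []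
          ⟨mp + 1, le_rfl, by omega, by simp; omega, by simp, by omega⟩ (by omega)
      · rw [if_neg hhash, if_neg hhash]
        by_cases hO : chars.getD mp ' ' = 'O'
        · rw [if_pos hO, if_pos hO]
          match q, hpw with
          | [], _ =>
            -- 'O' with no free slot: both leave it
            refine IH f (by omega) chars (mp + 1) []
              ⟨s, by omega, ?_, ?_, by simp, by simp⟩ (by omega)
            · intro i h1 h2
              rcases Nat.lt_or_ge i mp with h | h
              · exact hsharp i h1 h
              · have : i = mp := by omega
                rw [this, hO]; decide
            · intro i
              simp only [List.not_mem_nil, false_iff]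
              rintro ⟨a, b, c⟩
              rcases Nat.lt_or_ge i mp with h | h
              · exact (by simpa using (hmem i).2 ⟨a, h, c⟩)
              · have : i = mp := by omega
                rw [this, hO] at c; exact absurd c (by decide)
          | j :: rest, hpw =>
            -- the rock at mp rolls to slot j; A then rescans (j, mp], B moves on
            have hjq : j ∈ j :: rest := by simp
            obtain ⟨hsj, hjmp, hjdot⟩ := (hmem j).1 hjq
            have hjrest : ∀ d ∈ rest, j < d := by
              intro d hd; exact (List.pairwise_cons.1 hpw).1 d hd
            set chars' := (chars.set j 'O').set mp '.' with hchars'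
            have hlen' : chars'.length = chars.length := by simp [hchars']
            have hjne : j ≠ mp := by omega
            have hget_mp : chars'.getD mp ' ' = '.' :=
              getD_set_self _ mp '.' (by simp; omega)
            have hget_j : chars'.getD j ' ' = 'O' := by
              rw [hchars', getD_set_ne _ mp j '.' hjne, getD_set_self _ j 'O' (by omega)]
            have hget_other : ∀ i, i ≠ j → i ≠ mp → chars'.getD i ' ' = chars.getD i ' ' := by
              intro i hij himp
              rw [hchars', getD_set_ne _ mp i '.' himp, getD_set_ne _ j i 'O' hij]
            -- rescan: positions j+1 … mp contain no '#' and no 'O'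
            have hno : ∀ i, j + 1 ≤ i → i < (j + 1) + (mp - j) → chars'.getD i ' ' ≠ '#' ∧ chars'.getD i ' ' ≠ 'O' := by
              intro i h1 h2
              rcases Nat.lt_or_ge i mp with h | h
              · rw [hget_other i (by omega) (by omega)]
                refine ⟨hsharp i (by omega) h, ?_⟩
                intro hOx
                have := hOc i (by omega) h hOx j hjq
                omega
              · have : i = mp := by omega
                rw [this, hget_mp]; constructor <;> decide
            have harith : (j + 1) + (mp - j) = mp + 1 := by omega
            have hscan := scan_lemma (mp - j) f chars' (j + 1) none hno
              (by rw [harith, hlen']; omega) (by omega)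
            rw [harith] at hscan
            have hfd : firstDot chars' (j + 1) (mp - j) = (rest ++ [mp]).head? := by
              match rest, hjrest with
              | [], _ =>
                refine firstDot_eq_some (mp - j) chars' (j + 1) mp (by omega) (by omega) hget_mp ?_
                intro i' a b
                rw [hget_other i' (by omega) (by omega)]
                intro hdx
                have := (hmem i').2 ⟨by omega, by omega, hdx⟩
                simp at this; omega
              | r :: t, hjrest =>
                have hrq : r ∈ j :: r :: t := by simp
                obtain ⟨hsr, hrmp, hrdot⟩ := (hmem r).1 hrq
                have hjr : j < r := hjrest r (by simp)
                have hrt : ∀ d ∈ t, r < d := by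
                  intro d hd
                  exact (List.pairwise_cons.1 (List.pairwise_cons.1 hpw).2).1 d hd
                refine firstDot_eq_some (mp - j) chars' (j + 1) r (by omega) (by omega) ?_ ?_
                · rw [hget_other r (by omega) (by omega)]; exact hrdot
                · intro i' a b
                  rw [hget_other i' (by omega) (by omega)]
                  intro hdx
                  have := (hmem i').2 ⟨by omega, by omega, hdx⟩
                  simp at this
                  rcases this with h | h | h
                  · omega
                  · omega
                  · have := hrt i' h; omega
            simp only [List.head?_cons]
            rw [← hchars', hscan, hfd]
            · refine IH (f - (mp - j)) (by omega) chars' (mp + 1) (rest ++ [mp])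
                ⟨s, by omega, ?_, ?_, ?_, ?_⟩ (by rw [hlen']; omega)
              · intro i h1 h2
                rcases eq_or_ne i j with rfl | hij
                · rw [hget_j]; decide
                · rcases eq_or_ne i mp with rfl | himp
                  · rw [hget_mp]; decide
                  · rw [hget_other i hij himp]
                    exact hsharp i h1 (by omega)
              · intro i
                constructor
                · intro hi
                  rcases List.mem_append.1 hi with hi | hi
                  · obtain ⟨a, b, c⟩ := (hmem i).1 (by simp [hi])
                    have hij : i ≠ j := by have := hjrest i hi; omega
                    refine ⟨a, by omega, ?_⟩
                    rw [hget_other i hij (by omega)]; exact c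
                  · simp at hi; subst hi
                    exact ⟨by omega, by omega, hget_mp⟩
                · rintro ⟨a, b, c⟩
                  rcases eq_or_ne i mp with rfl | himp
                  · simp
                  · have hij : i ≠ j := by
                      intro he; rw [he, hget_j] at c; cases c
                    rw [hget_other i hij himp] at c
                    have := (hmem i).1 ((hmem i).2 ⟨a, by omega, c⟩)
                    have hin : i ∈ j :: rest := (hmem i).2 ⟨a, by omega, c⟩
                    simp at hin
                    rcases hin with h | h
                    · exact absurd h hij
                    · exact List.mem_append.2 (Or.inl h)
              · refine List.pairwise_append.2 ⟨(List.pairwise_cons.1 hpw).2, by simp, ?_⟩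
                intro a ha b hb
                simp at hb; subst hb
                exact ((hmem a).1 (by simp [ha])).2.1
              · intro p h1 h2 hOx d hd
                have hdmem : d = mp ∨ d ∈ rest := by
                  rcases List.mem_append.1 hd with h | h
                  · exact Or.inr h
                  · simp at h; exact Or.inl h
                rcases eq_or_ne p mp with rfl | hpmp
                · rw [hget_mp] at hOx; cases hOx
                · rcases eq_or_ne p j with rfl | hpj
                  · rcases hdmem with rfl | hd'
                    · omega
                    · exact hjrest d hd'
                  · rw [hget_other p hpj hpmp] at hOx
                    have hall := hOc p h1 (by omega) hOx
                    rcases hdmem with rfl | hd'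
                    · omega
                    · exact hall d (by simp [hd'])
        · -- any other character: both just move on
          rw [if_neg hO, if_neg hO]
          refine IH f (by omega) chars (mp + 1) q
            ⟨s, by omega, ?_, ?_, hpw, ?_⟩ (by omega)
          · intro i h1 h2
            rcases Nat.lt_or_ge i mp with h | h
            · exact hsharp i h1 h
            · have : i = mp := by omega
              subst this; exact hhash
          · intro i
            rw [hmem i]
            constructor
            · rintro ⟨a, b, c⟩; exact ⟨a, by omega, c⟩
            · rintro ⟨a, b, c⟩
              refine ⟨a, ?_, c⟩
              rcases Nat.lt_or_ge i mp with h | h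
              · exact h
              · have : i = mp := by omega
                subst this; exact absurd c hdot
          · intro p h1 h2 hOx d hd
            rcases Nat.lt_or_ge p mp with h | h
            · exact hOc p h1 h hOx d hd
            · have : p = mp := by omega
              subst this; exact absurd hOx hO

-- ===== VERDICT (by name: the statement is the Claim_ definition above) =====
theorem tilt_column_spec : Claim_equal_tilt_column := by
  intro column _
  unfold Spec_tilt_column tilt_column tilt_column_alt
  rw [tiltB_loop_eq_core _ _ _ _ (by simp)]
  have h := main_lemma ((column.toList.length + 1) * (column.toList.length + 1)) column.toList 0 []
    ⟨0, le_rfl, by omega, by simp, by simp, by simp⟩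
    (by
      have := Nat.mul_le_mul_right (column.toList.length + 1) (Nat.le_succ column.toList.length)
      simpa using this)
  exact congrArg String.mk (by simpa using h)
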